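-- pv_equiv track=rewrite | github.com/Anandmv26/zomato-recom | phase2_llm_engine/llm_engine.py | _enrich_from_candidates
-- ===== SOURCE A (Python) =====
-- def _enrich_from_candidates(
--     validated: list[dict],
--     candidates: list[dict],
-- ) -> list[dict]:
--     """
--     Merge back fields that were stripped before sending to the LLM
--     (zomato_url, phone) by matching on restaurant name.
--     """
--     # Build a lookup by lowercase name for O(1) matching
--     lookup = {}
--     for c in candidates:
--         key = str(c.get("name", "")).strip().lower()
--         if key and key not in lookup:
--             lookup[key] = c
--
--     for rec in validated:
--         name_key = str(rec.get("name", "")).strip().lower()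
--         original = lookup.get(name_key, {})
--         rec.setdefault("zomato_url", original.get("zomato_url", "N/A"))
--         rec.setdefault("phone", original.get("phone", "N/A"))
--
--     return validated
-- ===== SOURCE B (Python) =====
-- def _enrich_from_candidates(
--     validated: list[dict],
--     candidates: list[dict],
-- ) -> list[dict]:
--     """
--     Merge back fields stripped before the LLM call by matching on
--     restaurant name: one pass over `validated`, scanning `candidates`
--     for the first name match (no prebuilt lookup dict).
--     """
--     for rec in validated:
--         name_key = str(rec.get("name", "")).strip().lower()
--         original = {}
--         if name_key:
--             for c in candidates:
--                 if str(c.get("name", "")).strip().lower() == name_key: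
--                     original = c
--                     break
--         rec.setdefault("zomato_url", original.get("zomato_url", "N/A"))
--         rec.setdefault("phone", original.get("phone", "N/A"))
--     return validated
-- ===== Notes on version B (the rewrite author's own statement) =====
-- stated objective: simpler
-- what changed: Drops A's prebuilt lowercase-name lookup dict; B finds each record's original candidate by a direct first-match linear scan of candidates (empty keys never match), trading A's O(n+m) hash strategy for a shorter O(n*m) scan.
import Mathlib
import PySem

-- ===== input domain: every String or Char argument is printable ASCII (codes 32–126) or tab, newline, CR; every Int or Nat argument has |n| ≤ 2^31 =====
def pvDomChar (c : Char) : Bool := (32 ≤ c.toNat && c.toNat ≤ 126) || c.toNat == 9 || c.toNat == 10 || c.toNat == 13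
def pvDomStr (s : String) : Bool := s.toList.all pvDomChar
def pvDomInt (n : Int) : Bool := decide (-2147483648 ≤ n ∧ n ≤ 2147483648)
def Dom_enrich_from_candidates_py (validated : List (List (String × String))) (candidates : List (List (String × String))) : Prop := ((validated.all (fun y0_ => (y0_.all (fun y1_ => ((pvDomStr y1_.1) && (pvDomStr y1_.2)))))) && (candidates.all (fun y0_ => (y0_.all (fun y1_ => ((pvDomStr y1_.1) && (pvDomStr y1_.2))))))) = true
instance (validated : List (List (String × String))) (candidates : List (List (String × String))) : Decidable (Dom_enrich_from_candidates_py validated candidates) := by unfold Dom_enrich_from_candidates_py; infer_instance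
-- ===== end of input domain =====

-- B drops A's prebuilt lowercase-name lookup dict and scans `candidates` for the first name
-- match per record instead (objective: simpler). Both Pythons mutate the dicts in `validated`
-- in place identically; the theorems below are about the return value.

-- shared dict-primitive helpers (records are association lists; Python dict.get = first match,
-- dict.setdefault = keep if present else append)
def recGetD (rec : List (String × String)) (k dflt : String) : String :=
  match rec.find? (fun p => p.1 == k) with
  | some p => p.2
  | none => dflt

def recSetdefault (rec : List (String × String)) (k v : String) : List (String × String) :=
  if rec.any (fun p => p.1 == k) then rec else rec ++ [(k, v)]

-- str(rec.get("name", "")).strip().lower()  (values are strings, so str() is the identity)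
def nameKey (rec : List (String × String)) : String :=
  PySem.Str.lower (PySem.Str.strip (recGetD rec "name" ""))

-- rec.setdefault("zomato_url", original.get("zomato_url", "N/A")); rec.setdefault("phone", …)
def enrichRec (rec original : List (String × String)) : List (String × String) :=
  recSetdefault (recSetdefault rec "zomato_url" (recGetD original "zomato_url" "N/A"))
    "phone" (recGetD original "phone" "N/A")

-- ===== PORT A =====
-- loop body of A's lookup-building pass: key = name key of c; insert if key non-empty and new
def stepA (lookup : PySem.Dict String (List (String × String)))
    (c : List (String × String)) : PySem.Dict String (List (String × String)) :=
  if nameKey c ≠ "" ∧ lookup.contains (nameKey c) = false then lookup.insert (nameKey c) c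
  else lookup

def buildLookup (candidates : List (List (String × String))) :
    PySem.Dict String (List (String × String)) :=
  candidates.foldl stepA PySem.Dict.empty

def enrich_from_candidates_py (validated : List (List (String × String))) (candidates : List (List (String × String))) : List (List (String × String)) :=
  let lookup := buildLookup candidates
  validated.map (fun rec => enrichRec rec (lookup.getD (nameKey rec) []))

-- ===== PORT B =====
def enrich_from_candidates_py_alt (validated : List (List (String × String))) (candidates : List (List (String × String))) : List (List (String × String)) :=
  validated.map (fun rec =>
    let name_key := nameKey rec
    let original : List (String × String) :=
      if name_key = "" then []
      else (candidates.find? (fun c => nameKey c == name_key)).getD []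
    enrichRec rec original)

-- ===== PRECONDITION & SPEC =====
def Spec_enrich_from_candidates_py (validated : List (List (String × String))) (candidates : List (List (String × String))) (out : List (List (String × String))) : Prop := out = enrich_from_candidates_py_alt validated candidates
instance (validated : List (List (String × String))) (candidates : List (List (String × String))) (out : List (List (String × String))) : Decidable (Spec_enrich_from_candidates_py validated candidates out) := by unfold Spec_enrich_from_candidates_py; infer_instance

-- ===== CLAIM (what is proved, stated in full; the proofs are below) =====
def Claim_equal_enrich_from_candidates_py : Prop := ∀ (validated : List (List (String × String))) (candidates : List (List (String × String))), Dom_enrich_from_candidates_py validated candidates → Spec_enrich_from_candidates_py validated candidates (enrich_from_candidates_py validated candidates)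

-- ===== LEMMAS AND PROOFS =====

-- A's conditional-insert fold looked up at k is: d's binding if any, else (for non-empty k)
-- the first candidate whose name key is k.
theorem buildLookup_get (cs : List (List (String × String)))
    (d : PySem.Dict String (List (String × String))) (k : String) :
    (cs.foldl stepA d).get? k
      = match d.get? k with
        | some v => some v
        | none => if k = "" then none else cs.find? (fun c => nameKey c == k) := by
  induction cs generalizing d with
  | nil => cases h : d.get? k <;> simp [h]
  | cons c cs ih =>
    rw [List.foldl_cons, ih, List.find?]
    by_cases hc : nameKey c = ""
    · have hstep : stepA d c = d := by rw [stepA, if_neg]; simp [hc]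
      rw [hstep]
      cases h : d.get? k with
      | some v => rfl
      | none =>
        by_cases hk : k = ""
        · simp [hk]
        · have hb : (nameKey c == k) = false := by
            simp only [beq_eq_false_iff_ne, ne_eq, hc]
            exact fun h' => hk h'.symm
          simp [hk, hb]
    · by_cases hcont : d.contains (nameKey c) = false
      · have hstep : stepA d c = d.insert (nameKey c) c := by
          rw [stepA, if_pos]; exact ⟨hc, hcont⟩
        rw [hstep, PySem.Dict.get?_insert]
        by_cases hk : k = nameKey c
        · have hk2 : k ≠ "" := hk ▸ hc
          have hd : d.get? k = none := by
            rw [PySem.Dict.get?_eq_none_iff_contains, hk]; simpa using hcont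
          subst hk
          simp [hd, hc]
        · have hb : (nameKey c == k) = false := by
            simp only [beq_eq_false_iff_ne, ne_eq]
            exact fun h' => hk h'.symm
          cases h : d.get? k with
          | some v => simp [hk]
          | none => by_cases hk2 : k = "" <;> simp [hk, hk2, hb, hc]
      · have hstep : stepA d c = d := by
          rw [stepA, if_neg]; exact fun ⟨_, h2⟩ => hcont h2
        rw [hstep]
        cases h : d.get? k with
        | some v => rfl
        | none =>
          have hne : nameKey c ≠ k := by
            intro he
            rw [PySem.Dict.get?_eq_none_iff_contains] at h
            exact hcont (he ▸ h)
          have hb : (nameKey c == k) = false := by simpa using hne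
          by_cases hk : k = "" <;> simp [hk, hb]

-- the lookup dict, queried at k with default [], is exactly B's guarded first-match scan
theorem buildLookup_getD (candidates : List (List (String × String))) (k : String) :
    (buildLookup candidates).getD k []
      = if k = "" then [] else (candidates.find? (fun c => nameKey c == k)).getD [] := by
  rw [PySem.Dict.getD_eq_get?_getD, buildLookup, buildLookup_get, PySem.Dict.get?_empty]
  by_cases hk : k = "" <;> simp [hk]

-- ===== VERDICT (by name: the statement is the Claim_ definition above) =====
theorem enrich_from_candidates_py_spec : Claim_equal_enrich_from_candidates_py := by
  intro validated candidates _
  unfold Spec_enrich_from_candidates_py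
  simp only [enrich_from_candidates_py, enrich_from_candidates_py_alt]
  apply List.map_congr_left
  intro rec _
  rw [buildLookup_getD]
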